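-- pv_equiv track=rewrite | github.com/lambdaclass/lambdaworks_stark_platinum | verifiers/cairo/src/parse_cairo_proof.py | padd_17
-- ===== SOURCE A (Python) =====
-- def bytes_to_little_endian_ints(input_bytes):
--      byte_chunks = [input_bytes[i:i + 8] for i in range(0, len(input_bytes), 8)]
--      little_endian_ints = [int.from_bytes(chunk, byteorder='little') for chunk in byte_chunks]
--      return little_endian_ints
--
-- def padd_17(input_bytes):
--     ints = bytes_to_little_endian_ints(input_bytes)
--     r=17-len(ints)
--     assert r>=0, "input too long"
--     if r==1:
--         ints.append(0x8000000000000001)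
--         return ints
--     elif r==0:
--         return ints
--     else:
--         ints.append(1)
--         while len(ints) < 16:
--             ints.append(0)
--         ints.append(0x8000000000000000)
--         return ints
-- ===== SOURCE B (Python) =====
-- def padd_17(input_bytes):
--     # single pass: accumulate little-endian ints directly, then pad in closed form
--     ints = []
--     for idx, b in enumerate(input_bytes):
--         if idx % 8 == 0:
--             ints.append(b)
--         else:
--             ints[-1] += b << (8 * (idx % 8))
--     n = len(ints)
--     assert n <= 17, "input too long"
--     if n == 17:
--         return ints
--     result = ints + [0] * (17 - n)
--     result[n] |= 1
--     result[16] |= 0x8000000000000000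
--     return result
-- ===== Notes on version B (the rewrite author's own statement) =====
-- stated objective: simpler
-- what changed: B parses in one pass (accumulating each little-endian int directly while enumerating the bytes, instead of slicing into 8-byte chunks and converting each) and replaces A's three-way branch with while-loop zero fill by a closed-form pad: extend with zeros to length 17, OR 1 into the first padding slot and OR 0x8000000000000000 into slot 16.
import Mathlib
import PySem

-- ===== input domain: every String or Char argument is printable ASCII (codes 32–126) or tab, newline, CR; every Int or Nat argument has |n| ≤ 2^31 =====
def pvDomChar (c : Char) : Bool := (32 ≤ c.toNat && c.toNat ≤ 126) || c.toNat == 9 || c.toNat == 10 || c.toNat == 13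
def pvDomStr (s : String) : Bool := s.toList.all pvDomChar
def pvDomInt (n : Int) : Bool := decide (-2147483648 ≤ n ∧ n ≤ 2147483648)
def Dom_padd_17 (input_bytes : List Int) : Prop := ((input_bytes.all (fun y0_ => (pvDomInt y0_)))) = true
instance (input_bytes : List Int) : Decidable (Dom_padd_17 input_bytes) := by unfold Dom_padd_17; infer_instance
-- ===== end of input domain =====

-- B replaces A's chunk-slicing parse and while-loop zero fill with a single enumerate pass
-- and a closed-form padding (extend with zeros, OR the two markers in); objective: simpler.

-- ===== PORT A =====
-- int.from_bytes(chunk, 'little') ported by hand as the little-endian fold: exact for lists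
-- of ints in range(0, 256) (Python raises ValueError outside that range; Pre_ excludes those).
def pvFromBytesLE (chunk : List Int) : Int :=
  chunk.foldr (fun b acc => acc * 256 + b) 0

def pvBytesToLEInts (input_bytes : List Int) : List Int :=
  ((PySem.List.pyRange 0 (PySem.List.len input_bytes) 8).map
      (fun i => PySem.List.slice input_bytes (some i) (some (i + 8)))).map pvFromBytesLE

-- the 'while len(ints) < 16: ints.append(0)' loop
def pvPadZeros (l : List Int) : List Int :=
  if l.length < 16 then pvPadZeros (l ++ [0]) else l
  termination_by 16 - l.length
  decreasing_by simp; omega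

-- assert r >= 0 raises AssertionError when r < 0: such inputs are excluded by Pre_
def padd_17 (input_bytes : List Int) : List Int :=
  let ints := pvBytesToLEInts input_bytes
  let r : Int := 17 - PySem.List.len ints
  if r = 1 then ints ++ [0x8000000000000001]
  else if r = 0 then ints
  else pvPadZeros (ints ++ [1]) ++ [0x8000000000000000]

-- ===== PORT B =====
-- one loop iteration of Source B: start a new int every 8th byte, else add b << (8*(idx%8)) to ints[-1]
def pvAltStep (ints : List Int) (p : Int × Int) : List Int :=
  if PySem.Int.mod p.1 8 = 0 then ints ++ [p.2]
  else PySem.List.pySetD ints (-1)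
        (PySem.List.pyGetD ints (-1) 0 + (p.2 <<< (8 * PySem.Int.mod p.1 8).toNat))

-- assert n <= 17 raises AssertionError when n > 17: such inputs are excluded by Pre_
def padd_17_alt (input_bytes : List Int) : List Int :=
  let ints := (PySem.List.enumerate input_bytes 0).foldl pvAltStep []
  let n := ints.length
  if n = 17 then ints
  else
    let result := ints ++ List.replicate (17 - n) 0
    let result := PySem.List.pySetD result (n : Int)
        (PySem.Int.bor (PySem.List.pyGetD result (n : Int) 0) 1)
    let result := PySem.List.pySetD result ((16 : Nat) : Int)
        (PySem.Int.bor (PySem.List.pyGetD result ((16 : Nat) : Int) 0) 0x8000000000000000)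
    result

-- ===== PRECONDITION & SPEC =====
-- Exactly where Python A returns: every element must be a byte (else int.from_bytes raises
-- ValueError) and at most 136 bytes = 17 little-endian ints (else the assert raises).
def Pre_padd_17 (input_bytes : List Int) : Prop :=
  input_bytes.length ≤ 136 ∧ ∀ b ∈ input_bytes, 0 ≤ b ∧ b < 256

instance (input_bytes : List Int) : Decidable (Pre_padd_17 input_bytes) := by
  unfold Pre_padd_17; infer_instance

def pvWitness_padd_17 : List Int := [1, 2]

def Spec_padd_17 (input_bytes : List Int) (out : List Int) : Prop := out = padd_17_alt input_bytes
instance (input_bytes : List Int) (out : List Int) : Decidable (Spec_padd_17 input_bytes out) := by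
  unfold Spec_padd_17; infer_instance

-- ===== CLAIM (what is proved, stated in full; the proofs are below) =====
def Claim_equal_padd_17 : Prop := ∀ (input_bytes : List Int), Dom_padd_17 input_bytes → Pre_padd_17 input_bytes → Spec_padd_17 input_bytes (padd_17 input_bytes)

-- ===== LEMMAS AND PROOFS =====

-- reference form of the parse: peel 8 bytes at a time; both ports are proved equal to it
def pvRef : List Int → List Int
  | [] => []
  | b :: t => pvFromBytesLE ((b :: t).take 8) :: pvRef (t.drop 7)
  termination_by l => l.length
  decreasing_by simp

theorem pvRef_nil : pvRef [] = [] := pvRef.eq_1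

theorem pvRef_cons (bs : List Int) (h : bs ≠ []) :
    pvRef bs = pvFromBytesLE (bs.take 8) :: pvRef (bs.drop 8) := by
  match bs with
  | b :: t => rw [pvRef.eq_2]; rfl

theorem pvRef_len_le : ∀ (n : Nat) (bs : List Int), bs.length ≤ 8 * n → (pvRef bs).length ≤ n := by
  intro n
  induction n with
  | zero => intro bs h
            match bs, h with
            | [], _ => simp [pvRef_nil]
  | succ k ih =>
      intro bs h
      match bs with
      | [] => simp [pvRef_nil]
      | b :: t =>
          rw [pvRef_cons _ (by simp)]
          have hh := h
          simp at hh
          have := ih ((b :: t).drop 8) (by simp; omega)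
          simpa using this

theorem pvPyRange8_nil (m : Int) (h : m ≤ 0) : PySem.List.pyRange 0 m 8 = [] := by
  rw [PySem.List.pyRange_of_pos _ _ (by norm_num)]
  rw [if_neg (by omega)]
  simp

theorem pvPyRange8_cons (m : Int) (h : 0 < m) :
    PySem.List.pyRange 0 m 8 = 0 :: (PySem.List.pyRange 0 (m - 8) 8).map (· + 8) := by
  rw [PySem.List.pyRange_of_pos _ _ (by norm_num), PySem.List.pyRange_of_pos _ _ (by norm_num)]
  rw [if_pos h]
  have hq : ((m - 0 + 8 - 1) / 8).toNat
      = (if 0 < m - 8 then ((m - 8 - 0 + 8 - 1) / 8).toNat else 0) + 1 := by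
    split_ifs with h8 <;> omega
  rw [hq, List.range_succ_eq_map]
  simp [List.map_map, Function.comp]
  intro a _
  ring

theorem pvBytesToLEInts_nil : pvBytesToLEInts [] = [] := by
  simp [pvBytesToLEInts, pvPyRange8_nil 0 (by norm_num)]

theorem pvA_parse : ∀ (n : Nat) (bs : List Int), bs.length ≤ n → pvBytesToLEInts bs = pvRef bs := by
  intro n
  induction n with
  | zero =>
      intro bs h
      match bs, h with
      | [], _ => rw [pvBytesToLEInts_nil, pvRef_nil]
  | succ k ih =>
      intro bs h
      match bs with
      | [] => rw [pvBytesToLEInts_nil, pvRef_nil]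
      | b :: t =>
          rw [pvRef_cons _ (by simp)]
          unfold pvBytesToLEInts
          rw [show PySem.List.len (b :: t) = ((b :: t).length : Int) from PySem.List.len_eq _]
          rw [pvPyRange8_cons _ (by simp)]
          rw [List.map_cons, List.map_cons, List.map_map]
          congr 1
          · -- head chunk: slice bs 0 8 = take 8
            rw [show PySem.List.slice (b :: t) (some 0) (some (0 + 8))
                  = PySem.List.slice (b :: t) (some ((0 : Nat) : Int)) (some ((8 : Nat) : Int)) by norm_num]
            rw [PySem.List.slice_natCast]
            simp
          · -- tail chunks: shift into (b :: t).drop 8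
            rw [← ih ((b :: t).drop 8) (by have hh := h; simp at hh ⊢; omega)]
            unfold pvBytesToLEInts
            conv_rhs => rw [List.map_map]
            rw [show PySem.List.len ((b :: t).drop 8) = (((b :: t).drop 8).length : Int) from
                  PySem.List.len_eq _]
            have hrange : PySem.List.pyRange 0 (((b :: t).length : Int) - 8) 8
                = PySem.List.pyRange 0 ((((b :: t).drop 8).length : Int)) 8 := by
              by_cases hlen : (b :: t).length ≤ 8
              · rw [pvPyRange8_nil _ (by simp only [List.length_cons] at hlen ⊢; omega), pvPyRange8_nil _ (by simp at hlen ⊢; omega)]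
              · congr 1; simp at hlen ⊢; omega
            rw [← hrange, List.map_map]
            apply List.map_congr_left
            intro i hi
            have hmem := (PySem.List.mem_pyRange_iff_of_pos (by norm_num) i).1 hi
            have h0 : 0 ≤ i := hmem.1
            simp only [Function.comp_apply]
            congr 1
            rw [PySem.List.slice_toNat _ (by omega) (by omega),
                PySem.List.slice_toNat _ (by omega) (by omega)]
            rw [List.drop_drop]
            have h1 : (i + 8).toNat = 8 + i.toNat := by omega
            rw [h1]
            have h2 : (i + 8 + 8).toNat - (8 + i.toNat) = 8 + i.toNat - i.toNat := by omega
            rw [h2]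

theorem pvB_chunk_tail : ∀ (t : List Int) (s : Int) (j : Nat) (acc : List Int) (v : Int),
    1 ≤ j → j + t.length ≤ 8 → s % 8 = (j : Int) % 8 →
    (PySem.List.enumerate t s).foldl pvAltStep (acc ++ [v])
      = acc ++ [v + pvFromBytesLE t * 2 ^ (8 * j)] := by
  intro t
  induction t with
  | nil => intro s j acc v _ _ _; simp [PySem.List.enumerate, pvFromBytesLE]
  | cons b tt ih =>
      intro s j acc v h1 h8 hs
      have hj7 : j ≤ 7 := by simp at h8; omega
      have hmod : PySem.Int.mod s 8 = (j : Int) := by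
        rw [PySem.Int.mod_eq_emod_of_pos (by norm_num)]; omega
      rw [PySem.List.enumerate_cons, List.foldl_cons]
      have hstep : pvAltStep (acc ++ [v]) (s, b)
          = acc ++ [v + b * 2 ^ (8 * j)] := by
        unfold pvAltStep
        rw [if_neg (by rw [hmod]; simp; omega)]
        simp only [hmod]
        rw [PySem.List.pyGetD_neg_one_append_singleton]
        have htn : ((8 * (j : Int)).toNat) = 8 * j := by omega
        rw [htn, Int.shiftLeft_eq]
        simp [PySem.List.pySetD, PySem.List.pySet?, PySem.List.pyIdx?]
      rw [hstep, ih (s + 1) (j + 1) acc (v + b * 2 ^ (8 * j)) (by omega) (by simp at h8 ⊢; omega)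
            (by omega)]
      have hfl : pvFromBytesLE (b :: tt) = pvFromBytesLE tt * 256 + b := by
        simp [pvFromBytesLE]
      rw [hfl]
      congr 2
      have hp : (2 : Int) ^ (8 * (j + 1)) = 2 ^ (8 * j) * 256 := by ring
      rw [hp]; ring

theorem pvB_chunk (c : List Int) (s : Int) (acc : List Int)
    (hne : c ≠ []) (hlen : c.length ≤ 8) (hs : s % 8 = 0) :
    (PySem.List.enumerate c s).foldl pvAltStep acc = acc ++ [pvFromBytesLE c] := by
  match c with
  | c0 :: ct =>
      rw [PySem.List.enumerate_cons, List.foldl_cons]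
      have hmod : PySem.Int.mod s 8 = 0 := by
        rw [PySem.Int.mod_eq_emod_of_pos (by norm_num)]; omega
      have hstep : pvAltStep acc (s, c0) = acc ++ [c0] := by
        unfold pvAltStep; rw [if_pos (by simpa using hmod)]
      rw [hstep, pvB_chunk_tail ct (s + 1) 1 acc c0 (by norm_num) (by simp at hlen ⊢; omega)
            (by omega)]
      have hfl : pvFromBytesLE (c0 :: ct) = c0 + pvFromBytesLE ct * 2 ^ (8 * 1) := by
        simp [pvFromBytesLE]; ring
      rw [hfl]

theorem pvB_parse : ∀ (n : Nat) (bs : List Int) (s : Int) (acc : List Int), bs.length ≤ n →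
    s % 8 = 0 → (PySem.List.enumerate bs s).foldl pvAltStep acc = acc ++ pvRef bs := by
  intro n
  induction n with
  | zero =>
      intro bs s acc h _
      match bs, h with
      | [], _ => simp [PySem.List.enumerate, pvRef_nil]
  | succ k ih =>
      intro bs s acc h hs
      match bs with
      | [] => simp [PySem.List.enumerate, pvRef_nil]
      | b :: t =>
          rw [pvRef_cons _ (by simp)]
          by_cases hlen : (b :: t).length ≤ 8
          · rw [pvB_chunk (b :: t) s acc (by simp) hlen hs]
            rw [List.take_of_length_le hlen, List.drop_eq_nil_of_le hlen, pvRef_nil]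
          · conv_lhs => rw [← List.take_append_drop 8 (b :: t)]
            rw [PySem.List.enumerate_append, List.foldl_append]
            rw [pvB_chunk _ s acc (by simp) (by simp) hs]
            rw [ih ((b :: t).drop 8) _ _ (by have hh := h; simp at hh ⊢; omega)
                  (by have h7 : 7 ≤ t.length := by simp at hlen; omega
                      simp [List.length_take, min_eq_left h7]; omega)]
            simp

theorem pvPadZeros_eq : ∀ (n : Nat) (l : List Int), 16 - l.length ≤ n →
    pvPadZeros l = l ++ List.replicate (16 - l.length) 0 := by
  intro n
  induction n with
  | zero =>
      intro l h
      rw [pvPadZeros, if_neg (by omega)]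
      have h0 : 16 - l.length = 0 := by omega
      simp [h0]
  | succ k ih =>
      intro l h
      by_cases hl : l.length < 16
      · rw [pvPadZeros, if_pos hl, ih (l ++ [0]) (by simp; omega)]
        have hr : 16 - l.length = (16 - (l ++ [0]).length) + 1 := by simp; omega
        rw [hr, List.replicate_succ, List.append_assoc]
        rfl
      · rw [pvPadZeros, if_neg hl]
        have h0 : 16 - l.length = 0 := by omega
        simp [h0]

theorem pvSet_append_length (L : List Int) (a v : Int) (rest : List Int) :
    (L ++ a :: rest).set L.length v = L ++ v :: rest := by simp

theorem pvGetD_append_length (L : List Int) (a d : Int) (rest : List Int) :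
    (L ++ a :: rest).getD L.length d = a := by simp

-- ===== VERDICT (by name: the statement is the Claim_ definition above) =====
theorem padd_17_spec : Claim_equal_padd_17 := by
  intro input_bytes _hdom hpre
  obtain ⟨hlen, _hbytes⟩ := hpre
  unfold Spec_padd_17
  unfold padd_17 padd_17_alt
  dsimp only
  rw [pvA_parse input_bytes.length input_bytes le_rfl,
      pvB_parse input_bytes.length input_bytes 0 [] le_rfl (by norm_num)]
  rw [List.nil_append]
  set L := pvRef input_bytes with hL
  have hn : L.length ≤ 17 := by
    have := pvRef_len_le 17 input_bytes (by omega)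
    simpa [hL] using this
  rw [show PySem.List.len L = (L.length : Int) from PySem.List.len_eq _]
  by_cases h17 : L.length = 17
  · rw [if_neg (by omega), if_pos (by omega), if_pos h17]
  · rw [if_neg h17]
    simp only [PySem.List.pySetD_natCast, PySem.List.pyGetD_natCast]
    by_cases h16 : L.length = 16
    · rw [if_pos (by omega)]
      have hrep : List.replicate (17 - L.length) (0 : Int) = [0] := by simp [h16]
      rw [hrep]
      rw [show (L ++ [(0:Int)]).getD L.length 0 = 0 from pvGetD_append_length L 0 0 []]
      rw [show PySem.Int.bor 0 1 = 1 from by decide]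
      rw [pvSet_append_length L 0 1 []]
      rw [show (16 : Nat) = L.length from h16.symm]
      rw [pvGetD_append_length L 1 0 [], pvSet_append_length L 1 _ []]
      rw [show PySem.Int.bor 1 0x8000000000000000 = 0x8000000000000001 from by decide]
    · -- at least two padding slots
      rw [if_neg (by omega), if_neg (by omega)]
      rw [pvPadZeros_eq 16 (L ++ [1]) (by simp; omega)]
      have hA : 16 - (L ++ [(1:Int)]).length = 15 - L.length := by simp
      rw [hA]
      have hrep : List.replicate (17 - L.length) (0 : Int)
          = 0 :: (List.replicate (15 - L.length) 0 ++ [0]) := by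
        have hm : 17 - L.length = (15 - L.length) + 1 + 1 := by omega
        rw [hm, List.replicate_succ, List.replicate_succ']
      rw [hrep]
      rw [pvGetD_append_length L 0 0 _, pvSet_append_length L 0 _ _]
      rw [show PySem.Int.bor 0 1 = 1 from by decide]
      have hsplit : L ++ (1 : Int) :: (List.replicate (15 - L.length) 0 ++ [0])
          = (L ++ 1 :: List.replicate (15 - L.length) 0) ++ (0 : Int) :: [] := by
        simp
      rw [hsplit]
      have hplen : (L ++ (1 : Int) :: List.replicate (15 - L.length) 0).length = 16 := by
        simp; omega
      rw [show (16 : Nat) = (L ++ (1 : Int) :: List.replicate (15 - L.length) 0).length from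
            hplen.symm]
      rw [pvGetD_append_length _ 0 0 [], pvSet_append_length _ 0 _ []]
      rw [show PySem.Int.bor 0 0x8000000000000000 = 0x8000000000000000 from by decide]
      simp
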